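-- pv_equiv track=rewrite | github.com/SemiGnu/advent-of-sharp | 17/17.py | get_y_steps
-- ===== SOURCE A (Python) =====
-- y_range = range(-106, -70)
--
-- def get_y_steps(velocity):
--     steps = []
--     pos = 0
--     step = 0
--     while pos >= y_range[0]:
--         step += 1
--         pos += velocity
--         velocity -= 1
--         if y_range[0] <= pos <= y_range[-1]:
--             steps.append(step)
--     return steps
-- ===== SOURCE B (Python) =====
-- import math
--
-- y_range = range(-106, -70)
--
-- def _first_step(velocity):
--     # smallest integer s with pos(s) <= -71, i.e. s*s - (2v+1)*s - 142 >= 0 (for s >= 1)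
--     b = 2 * velocity + 1
--     d = b * b + 568
--     r = math.isqrt(d)
--     if r * r < d:
--         r += 1            # ceiling of sqrt(d)
--     return (b + r + 1) // 2
--
-- def _last_step(velocity):
--     # largest integer s with pos(s) >= -106, i.e. s*s - (2v+1)*s - 212 <= 0 (for s >= 1)
--     b = 2 * velocity + 1
--     r = math.isqrt(b * b + 848)   # floor of sqrt(d)
--     return (b + r) // 2
--
-- def get_y_steps(velocity):
--     # position after s steps is s*velocity - s*(s-1)//2; solve the two quadratics
--     # pos(s) <= -71 and pos(s) >= -106 directly instead of simulating every step.
--     return list(range(_first_step(velocity), _last_step(velocity) + 1))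
-- ===== Notes on version B (the rewrite author's own statement) =====
-- stated objective: faster
-- what changed: Replaces the step-by-step projectile simulation (loop until the probe falls below the band) by solving the two quadratics pos(s) = s*v - s*(s-1)/2 <= -71 and pos(s) >= -106 in closed form with math.isqrt, returning the resulting contiguous range of steps directly.
import Mathlib
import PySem

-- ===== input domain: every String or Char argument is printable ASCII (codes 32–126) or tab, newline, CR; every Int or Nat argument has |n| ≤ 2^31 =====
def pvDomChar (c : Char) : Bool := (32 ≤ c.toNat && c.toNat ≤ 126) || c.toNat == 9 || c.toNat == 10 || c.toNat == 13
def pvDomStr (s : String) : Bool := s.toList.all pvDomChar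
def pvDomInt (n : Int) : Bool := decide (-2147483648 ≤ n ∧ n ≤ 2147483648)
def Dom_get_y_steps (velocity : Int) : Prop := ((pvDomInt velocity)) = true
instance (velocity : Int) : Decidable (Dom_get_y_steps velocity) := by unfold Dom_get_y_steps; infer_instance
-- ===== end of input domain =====

-- B replaces A's O(velocity) step-by-step simulation by an O(1) closed-form solution of the
-- two quadratics bounding the landing band (objective: faster, asymptotic).

-- ===== PORT A =====
-- Python module constant: y_range = range(-106, -70); A only reads y_range[0] = -106 and y_range[-1] = -71.
def pv_y_first : Int := -106  -- y_range[0]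
def pv_y_last : Int := -71    -- y_range[-1]

-- termination measure for A's while loop (proof-only helpers)
def pvTri (v : Int) : Int := max v 0 * (max v 0 + 1) / 2
def pvMu (pos v : Int) : Nat := (max (v + 1) 0).toNat + (pos + pvTri v + 107).toNat

-- the while loop of A, state = (steps, pos, step, velocity); the Nat fuel only makes the
-- loop structurally total: pvMu 0 velocity overestimates the iterations, so it never runs out
-- (pvLoopA_inv below proves the result with this fuel is the loop's fixpoint value)
def pvLoopA (fuel : Nat) (steps : List Int) (pos step velocity : Int) : List Int :=
  match fuel with
  | 0 => steps
  | fuel + 1 =>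
    if pv_y_first ≤ pos then
      pvLoopA fuel
        (if pv_y_first ≤ pos + velocity ∧ pos + velocity ≤ pv_y_last
          then steps ++ [step + 1] else steps)
        (pos + velocity) (step + 1) (velocity - 1)
    else steps

def get_y_steps (velocity : Int) : List Int := pvLoopA (pvMu 0 velocity) [] 0 0 velocity


-- ===== PORT B =====
-- smallest integer s with pos(s) ≤ -71, i.e. s*s - (2v+1)*s - 142 ≥ 0 (for s ≥ 1)
def pvFirstStep (velocity : Int) : Int :=
  let b := 2 * velocity + 1
  let d := b * b + 568
  let r0 : Int := (Nat.sqrt d.toNat : Int)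
  let r := if r0 * r0 < d then r0 + 1 else r0   -- ceiling of sqrt(d)
  PySem.Int.floordiv (b + r + 1) 2

-- largest integer s with pos(s) ≥ -106, i.e. s*s - (2v+1)*s - 212 ≤ 0 (for s ≥ 1)
def pvLastStep (velocity : Int) : Int :=
  let b := 2 * velocity + 1
  let r : Int := (Nat.sqrt (b * b + 848).toNat : Int)  -- floor of sqrt
  PySem.Int.floordiv (b + r) 2

def get_y_steps_alt (velocity : Int) : List Int :=
  PySem.List.pyRange (pvFirstStep velocity) (pvLastStep velocity + 1) 1

-- ===== PRECONDITION & SPEC =====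
def Spec_get_y_steps (velocity : Int) (out : List Int) : Prop := out = get_y_steps_alt velocity
instance (velocity : Int) (out : List Int) : Decidable (Spec_get_y_steps velocity out) := by unfold Spec_get_y_steps; infer_instance

-- ===== CLAIM (what is proved, stated in full; the proofs are below) =====
def Claim_equal_get_y_steps : Prop := ∀ (velocity : Int), Dom_get_y_steps velocity → Spec_get_y_steps velocity (get_y_steps velocity)

-- ===== LEMMAS AND PROOFS =====

lemma pvTri_of_nonpos {v : Int} (h : v ≤ 0) : pvTri v = 0 := by
  unfold pvTri
  rw [max_eq_right h]
  norm_num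

lemma pvTri_succ {v : Int} (h : 1 ≤ v) : pvTri v = pvTri (v - 1) + v := by
  unfold pvTri
  rw [max_eq_left (by omega : (0:Int) ≤ v), max_eq_left (by omega : (0:Int) ≤ v - 1),
      show v * (v + 1) = (v - 1) * (v - 1 + 1) + v * 2 by ring,
      Int.add_mul_ediv_right _ _ (by norm_num : (2:Int) ≠ 0)]

lemma pvMu_lt (pos v : Int) (h : -106 ≤ pos) : pvMu (pos + v) (v - 1) < pvMu pos v := by
  unfold pvMu
  rcases lt_trichotomy v 1 with hv | hv | hv
  · rcases lt_trichotomy v 0 with hv0 | hv0 | hv0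
    · rw [pvTri_of_nonpos (by omega : v - 1 ≤ 0), pvTri_of_nonpos (by omega : v ≤ 0)]
      omega
    · subst hv0
      rw [pvTri_of_nonpos (by omega : (0:Int) - 1 ≤ 0), pvTri_of_nonpos (le_refl (0:Int))]
      omega
    · omega
  · subst hv
    rw [pvTri_of_nonpos (by omega : (1:Int) - 1 ≤ 0), pvTri_succ (le_refl (1:Int)),
        pvTri_of_nonpos (by omega : (1:Int) - 1 ≤ 0)]
    omega
  · have hts := pvTri_succ (by omega : 1 ≤ v)
    omega


-- position after s steps of A's simulation (proof-side closed form of the accumulated pos)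
def pvPos (v s : Int) : Int := s * v - s * (s - 1) / 2

lemma pvPos_zero (v : Int) : pvPos v 0 = 0 := by simp [pvPos]

lemma pvPos_succ (v s : Int) : pvPos v (s + 1) = pvPos v s + (v - s) := by
  unfold pvPos
  rw [show (s + 1) * (s + 1 - 1) = s * (s - 1) + s * 2 by ring,
      Int.add_mul_ediv_right _ _ (by norm_num : (2:Int) ≠ 0)]
  ring

lemma two_mul_pvPos (v s : Int) : 2 * pvPos v s = 2 * s * v - s * (s - 1) := by
  have hdvd : (2:Int) ∣ s * (s - 1) := by
    have h := Int.even_mul_succ_self (s - 1)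
    rw [show s - 1 + 1 = s by ring] at h
    exact Even.two_dvd (by rwa [mul_comm] at h)
  unfold pvPos
  rw [mul_sub, Int.mul_ediv_cancel' hdvd]
  ring

-- floor-sqrt bracketing, on the Int side
lemma pvSqrtFacts (d : Int) (hd : 0 ≤ d) :
    (Nat.sqrt d.toNat : Int) * (Nat.sqrt d.toNat : Int) ≤ d ∧
      d < ((Nat.sqrt d.toNat : Int) + 1) * ((Nat.sqrt d.toNat : Int) + 1) := by
  have h1 := Nat.sqrt_le' d.toNat
  have h2 := Nat.lt_succ_sqrt' d.toNat
  have h1' : ((Nat.sqrt d.toNat : Int)) ^ 2 ≤ (d.toNat : Int) := by exact_mod_cast h1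
  have h2' : ((d.toNat : Int)) < ((Nat.sqrt d.toNat : Int) + 1) ^ 2 := by exact_mod_cast h2
  rw [Int.toNat_of_nonneg hd] at h1' h2'
  constructor
  · nlinarith [h1']
  · nlinarith [h2']

lemma pvFirstStep_le_iff (v t : Int) (ht : 1 ≤ t) :
    pvPos v t ≤ -71 ↔ pvFirstStep v ≤ t := by
  set b := 2 * v + 1 with hb
  set d := b * b + 568 with hd
  have hd0 : 0 ≤ d := by nlinarith [sq_nonneg b]
  set r0 : Int := (Nat.sqrt d.toNat : Int) with hr0def
  have hr00 : 0 ≤ r0 := Int.natCast_nonneg _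
  have h1 : r0 * r0 ≤ d := (pvSqrtFacts d hd0).1
  have h2 : d < (r0 + 1) * (r0 + 1) := (pvSqrtFacts d hd0).2
  set r : Int := if r0 * r0 < d then r0 + 1 else r0 with hrdef
  have hr0 : 0 ≤ r := by rw [hrdef]; split <;> omega
  have hrge : d ≤ r * r := by
    rw [hrdef]; split
    · nlinarith
    · omega
  have hrlt : (r - 1) * (r - 1) < d := by
    rw [hrdef]; split
    · simpa using ‹r0 * r0 < d›
    · have heq : r0 * r0 = d := by omega
      have hr0pos : 1 ≤ r0 := by nlinarith
      nlinarith
  have hfs : pvFirstStep v = (b + r + 1) / 2 := by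
    rw [pvFirstStep, PySem.Int.floordiv_eq_ediv_of_pos (by norm_num : (0:Int) < 2)]
  have hstep1 : pvPos v t ≤ -71 ↔ 0 ≤ t * t - b * t - 142 := by
    have h2p := two_mul_pvPos v t
    constructor
    · intro h; nlinarith
    · intro h; nlinarith
  have hstep2 : 0 ≤ t * t - b * t - 142 ↔ r ≤ 2 * t - b := by
    have hkey : (2 * t - b) ^ 2 = 4 * (t * t - b * t - 142) + d := by rw [hd]; ring
    constructor
    · intro hg
      by_contra hcon
      push_neg at hcon
      rcases le_or_gt 0 (2 * t - b) with hc | hc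
      · have hrr1 : 1 ≤ r := by omega
        nlinarith
      · nlinarith
    · intro hge
      nlinarith
  rw [hstep1, hstep2, hfs]
  omega

lemma le_pvLastStep_iff (v t : Int) (ht : 1 ≤ t) :
    -106 ≤ pvPos v t ↔ t ≤ pvLastStep v := by
  set b := 2 * v + 1 with hb
  set d := b * b + 848 with hd
  have hd0 : 0 ≤ d := by nlinarith [sq_nonneg b]
  set r : Int := (Nat.sqrt d.toNat : Int) with hrdef
  have hr0 : 0 ≤ r := Int.natCast_nonneg _
  have h1 : r * r ≤ d := (pvSqrtFacts d hd0).1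
  have h2 : d < (r + 1) * (r + 1) := (pvSqrtFacts d hd0).2
  have habs : b ≤ r ∧ -r ≤ b := by
    constructor
    · by_contra hcon; push_neg at hcon; nlinarith
    · by_contra hcon; push_neg at hcon; nlinarith
  have hls : pvLastStep v = (b + r) / 2 := by
    rw [pvLastStep, PySem.Int.floordiv_eq_ediv_of_pos (by norm_num : (0:Int) < 2)]
  have hstep1 : -106 ≤ pvPos v t ↔ t * t - b * t - 212 ≤ 0 := by
    have h2p := two_mul_pvPos v t
    constructor
    · intro h; nlinarith
    · intro h; nlinarith
  have hstep2 : t * t - b * t - 212 ≤ 0 ↔ 2 * t - b ≤ r := by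
    have hkey : (2 * t - b) ^ 2 = 4 * (t * t - b * t - 212) + d := by rw [hd]; ring
    constructor
    · intro hg
      by_contra hcon
      push_neg at hcon
      nlinarith
    · intro hge
      have hlow : -r ≤ 2 * t - b := by omega
      nlinarith
  rw [hstep1, hstep2, hls]
  omega

lemma pvFirstStep_pos (v : Int) : 1 ≤ pvFirstStep v := by
  set b := 2 * v + 1 with hb
  set d := b * b + 568 with hd
  have hd0 : 0 ≤ d := by nlinarith [sq_nonneg b]
  set r0 : Int := (Nat.sqrt d.toNat : Int) with hr0def
  have hr00 : 0 ≤ r0 := Int.natCast_nonneg _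
  have h2 : d < (r0 + 1) * (r0 + 1) := (pvSqrtFacts d hd0).2
  set r : Int := if r0 * r0 < d then r0 + 1 else r0 with hrdef
  have hrge : d ≤ r * r := by
    rw [hrdef]; split
    · nlinarith
    · have h1 : r0 * r0 ≤ d := (pvSqrtFacts d hd0).1
      omega
  have hr0 : 0 ≤ r := by rw [hrdef]; split <;> omega
  have hbr : 1 ≤ b + r := by
    by_contra hcon
    push_neg at hcon
    nlinarith
  have hfs : pvFirstStep v = (b + r + 1) / 2 := by
    rw [pvFirstStep, PySem.Int.floordiv_eq_ediv_of_pos (by norm_num : (0:Int) < 2)]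
  rw [hfs]
  omega

-- the steps still to be collected when the loop is at step s
def pvIval (v s : Int) : List Int :=
  PySem.List.pyRange (max (pvFirstStep v) (s + 1)) (pvLastStep v + 1) 1

lemma pvIval_nil (v s : Int) (hs : 0 ≤ s) (h : pvPos v s < -106) : pvIval v s = [] := by
  have hs1 : 1 ≤ s := by
    rcases eq_or_lt_of_le hs with he | hl
    · exfalso; rw [← he, pvPos_zero] at h; omega
    · omega
  have := (le_pvLastStep_iff v s hs1).not
  have hhi : pvLastStep v < s := by
    by_contra hcon
    push_neg at hcon
    exact absurd ((le_pvLastStep_iff v s hs1).mpr hcon) (by omega)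
  exact PySem.List.pyRange_one_eq_nil (by omega : pvLastStep v + 1 ≤ max (pvFirstStep v) (s + 1))

lemma pvIval_step (v s : Int) (hs : 0 ≤ s) :
    pvIval v s =
      (if -106 ≤ pvPos v (s + 1) ∧ pvPos v (s + 1) ≤ -71 then [s + 1] else []) ++ pvIval v (s + 1) := by
  have h1 : (1:Int) ≤ s + 1 := by omega
  have hband : (-106 ≤ pvPos v (s + 1) ∧ pvPos v (s + 1) ≤ -71) ↔
      (pvFirstStep v ≤ s + 1 ∧ s + 1 ≤ pvLastStep v) := by
    rw [le_pvLastStep_iff v (s + 1) h1, pvFirstStep_le_iff v (s + 1) h1]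
    tauto
  unfold pvIval
  split
  · rename_i hyes
    have hb := hband.mp hyes
    rw [max_eq_right (by omega : pvFirstStep v ≤ s + 1),
        max_eq_right (by omega : pvFirstStep v ≤ s + 1 + 1),
        PySem.List.pyRange_one_cons (by omega : s + 1 < pvLastStep v + 1)]
    simp
  · rename_i hno
    have hb := hband.not.mp hno
    push_neg at hb
    rcases lt_or_ge (s + 1) (pvFirstStep v) with hlt | hge
    · rw [max_eq_left (by omega : s + 1 ≤ pvFirstStep v),
          max_eq_left (by omega : s + 1 + 1 ≤ pvFirstStep v)]
      simp
    · have hhi : pvLastStep v < s + 1 := hb hge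
      rw [PySem.List.pyRange_one_eq_nil (by omega : pvLastStep v + 1 ≤ max (pvFirstStep v) (s + 1)),
          PySem.List.pyRange_one_eq_nil (by omega : pvLastStep v + 1 ≤ max (pvFirstStep v) (s + 1 + 1))]
      simp

lemma pvLoopA_inv (v : Int) :
    ∀ (n : Nat) (s : Int) (steps : List Int), 0 ≤ s →
      pvMu (pvPos v s) (v - s) ≤ n →
      pvLoopA n steps (pvPos v s) s (v - s) = steps ++ pvIval v s := by
  intro n
  induction n with
  | zero =>
    intro s steps hs hmu
    have hg : pvPos v s < -106 := by
      by_contra hcon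
      have : 0 < (pvPos v s + pvTri (v - s) + 107).toNat := by
        have htri : 0 ≤ pvTri (v - s) := by unfold pvTri; positivity
        omega
      unfold pvMu at hmu
      omega
    show steps = steps ++ pvIval v s
    rw [pvIval_nil v s hs hg, List.append_nil]
  | succ n ih =>
    intro s steps hs hmu
    show (if pv_y_first ≤ pvPos v s then _ else steps) = steps ++ pvIval v s
    by_cases hg : pv_y_first ≤ pvPos v s
    · rw [if_pos hg]
      have hpos' : pvPos v s + (v - s) = pvPos v (s + 1) := (pvPos_succ v s).symm
      have hvel' : v - s - 1 = v - (s + 1) := by ring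
      have hmu' : pvMu (pvPos v (s + 1)) (v - (s + 1)) ≤ n := by
        have hlt := pvMu_lt (pvPos v s) (v - s) (by simpa [pv_y_first] using hg)
        rw [hpos', hvel'] at hlt
        omega
      rw [hpos', hvel']
      rw [ih (s + 1) _ (by omega) hmu']
      rw [pvIval_step v s hs]
      split
      · rename_i hyes
        rw [if_pos (by simpa [pv_y_first, pv_y_last, pvPos_succ] using hyes)]
        simp
      · rename_i hno
        rw [if_neg (by simpa [pv_y_first, pv_y_last, pvPos_succ] using hno)]
        simp
    · rw [if_neg hg]
      rw [pvIval_nil v s hs (by simp [pv_y_first] at hg; omega), List.append_nil]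

-- ===== VERDICT (by name: the statement is the Claim_ definition above) =====
theorem get_y_steps_spec : Claim_equal_get_y_steps := by
  intro v _
  show get_y_steps v = get_y_steps_alt v
  have h := pvLoopA_inv v (pvMu 0 v) 0 [] (le_refl 0)
    (by rw [pvPos_zero, sub_zero])
  rw [pvPos_zero, sub_zero] at h
  unfold get_y_steps
  rw [h]
  unfold pvIval get_y_steps_alt
  rw [max_eq_left (by have := pvFirstStep_pos v; omega : (0:Int) + 1 ≤ pvFirstStep v)]
  simp
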